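-- pv_equiv track=rewrite | github.com/amshrestha2020/CodeSignal | CodeSignal/Graphs/CaterpillarTrees.py | solution
-- ===== SOURCE A (Python) =====
-- from collections import defaultdict
--
-- def solution(n, edges):
--     G = defaultdict(set)
--     for u, v in edges:
--         G[u].add(v)
--         G[v].add(u)
--
--     ans0 = ans1 = 0
--
--     seen = set()
--     for i in range(n):
--         if i in seen:
--             continue
--         stack = [i]
--         saw = {i}
--         while stack:
--             node = stack.pop()
--             for nei in G[node]:
--                 if nei not in saw:
--                     saw.add(nei)
--                     stack.append(nei)
--
--         seen |= saw
--
--         if sum(len(G[node]) for node in saw) + 2 == len(saw) * 2: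
--             ans0 += 1
--             for node in set(saw):
--                 if len(G[node]) == 1:
--                     saw.discard(node)
--
--             ans1 += all(len(G[node] & saw) <= 2 for node in saw)
--
--     return ans0, ans1
-- ===== SOURCE B (Python) =====
-- def solution(n, edges):
--     adj = {}
--     for e in edges:
--         u, v = e
--         adj.setdefault(u, set()).add(v)
--         adj.setdefault(v, set()).add(u)
--
--     # connected components by min-label propagation (no DFS stack)
--     label = {v: v for v in adj}
--     for _ in range(len(label)):
--         changed = False
--         for e in edges:
--             u, v = e
--             lu = label[u]
--             lv = label[v]
--             m = lu if lu < lv else lv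
--             if lu != m:
--                 label[u] = m
--                 changed = True
--             if lv != m:
--                 label[v] = m
--                 changed = True
--         if not changed:
--             break
--
--     members = {}
--     for v in adj:
--         members.setdefault(label[v], []).append(v)
--
--     ans0 = ans1 = 0
--     done = set()
--     for i in range(n):
--         r = label.get(i, i)
--         if r in done:
--             continue
--         done.add(r)
--         comp = members.get(r, [i])
--         degsum = sum(len(adj.get(v, ())) for v in comp)
--         if degsum == 2 * (len(comp) - 1):
--             ans0 += 1
--             spine = [v for v in comp if len(adj.get(v, ())) != 1]
--             sp = set(spine)
--             ans1 += all(len(adj.get(v, set()) & sp) <= 2 for v in spine)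
--     return ans0, ans1
-- ===== Notes on version B (the rewrite author's own statement) =====
-- stated objective: alternative
-- what changed: Replaces the per-component stack DFS with global min-label propagation over the edge list (labels converge to a per-component representative), then groups nodes by label to get the components on which the tree and caterpillar tests run.
import Mathlib
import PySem

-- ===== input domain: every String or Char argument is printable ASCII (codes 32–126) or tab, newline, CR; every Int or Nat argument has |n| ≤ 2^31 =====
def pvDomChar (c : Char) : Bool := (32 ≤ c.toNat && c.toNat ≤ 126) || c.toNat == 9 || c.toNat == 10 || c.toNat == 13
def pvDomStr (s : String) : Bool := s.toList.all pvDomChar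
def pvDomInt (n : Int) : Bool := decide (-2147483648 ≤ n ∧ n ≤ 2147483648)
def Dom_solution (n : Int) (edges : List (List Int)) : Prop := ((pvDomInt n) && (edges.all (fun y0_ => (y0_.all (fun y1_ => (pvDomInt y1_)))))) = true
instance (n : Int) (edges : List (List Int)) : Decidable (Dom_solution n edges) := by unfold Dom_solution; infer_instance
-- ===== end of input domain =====

-- B replaces A's per-component stack DFS by min-label propagation over the edge list;
-- equality proved on inputs whose edges all have exactly two endpoints (elsewhere Python A raises ValueError).

-- ===== PORT A =====

-- shared by both ports: the deduplicated adjacency dict (Python: defaultdict(set) / dict-of-sets;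
-- both Pythons build it with the same statements). Edges that are not 2-element lists make both
-- Pythons raise (excluded by Pre_); the port skips them.
def buildAdj (edges : List (List Int)) : PySem.Dict Int (PySem.Set Int) :=
  edges.foldl (fun G e =>
    match e with
    | [u, v] => (G.modify u [] (fun s => PySem.Set.add s v)).modify v [] (fun s => PySem.Set.add s u)
    | _ => G) PySem.Dict.empty

-- one edge's two updates, seen through getD (used by the membership characterisations below)
lemma mem_getD_edgeStep (d : PySem.Dict Int (PySem.Set Int)) (u v a b : Int) :
    b ∈ ((d.modify u [] (fun s => PySem.Set.add s v)).modify v [] (fun s => PySem.Set.add s u)).getD a []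
      ↔ b ∈ d.getD a [] ∨ (a = u ∧ b = v) ∨ (a = v ∧ b = u) := by
  rw [PySem.Dict.getD_modify]
  split_ifs with hav
  · rw [PySem.Dict.getD_modify, PySem.Set.mem_add]
    split_ifs with hvu <;> simp_all [PySem.Set.mem_add]
  · rw [PySem.Dict.getD_modify]
    split_ifs with hau <;> simp_all [PySem.Set.mem_add]

-- membership in the adjacency sets, characterised by the edge list
lemma mem_getD_buildAdj (edges : List (List Int)) (a b : Int) :
    b ∈ (buildAdj edges).getD a []
      ↔ ∃ u v, [u, v] ∈ edges ∧ ((a = u ∧ b = v) ∨ (a = v ∧ b = u)) := by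
  have gen : ∀ (es : List (List Int)) (d : PySem.Dict Int (PySem.Set Int)),
      b ∈ (es.foldl (fun G e =>
        match e with
        | [u, v] => (G.modify u [] (fun s => PySem.Set.add s v)).modify v [] (fun s => PySem.Set.add s u)
        | _ => G) d).getD a []
      ↔ b ∈ d.getD a [] ∨ ∃ u v, [u, v] ∈ es ∧ ((a = u ∧ b = v) ∨ (a = v ∧ b = u)) := by
    intro es
    induction es with
    | nil => simp
    | cons e t ih =>
      intro d
      match e with
      | [] => simp only [List.foldl_cons]; rw [ih]; simp
      | [x] => simp only [List.foldl_cons]; rw [ih]; simp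
      | x :: y :: z :: r => simp only [List.foldl_cons]; rw [ih]; simp
      | [u, v] =>
        simp only [List.foldl_cons]
        rw [ih, mem_getD_edgeStep]
        constructor
        · rintro ((h | h | h) | ⟨u', v', hm, h⟩)
          · exact Or.inl h
          · exact Or.inr ⟨u, v, by simp, Or.inl h⟩
          · exact Or.inr ⟨u, v, by simp, Or.inr h⟩
          · exact Or.inr ⟨u', v', by simp [hm], h⟩
        · rintro (h | ⟨u', v', hm, h⟩)
          · exact Or.inl (Or.inl h)
          · rcases List.mem_cons.1 hm with he | ht
            · simp only [List.cons.injEq, and_true] at he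
              obtain ⟨rfl, rfl⟩ := he
              exact Or.inl (Or.inr h)
            · exact Or.inr ⟨u', v', ht, h⟩
  rw [show buildAdj edges = edges.foldl (fun G e =>
        match e with
        | [u, v] => (G.modify u [] (fun s => PySem.Set.add s v)).modify v [] (fun s => PySem.Set.add s u)
        | _ => G) PySem.Dict.empty from rfl, gen]
  simp [PySem.Dict.getD_empty]

-- membership in the key set, characterised by the edge list
lemma mem_keys_buildAdj (edges : List (List Int)) (a : Int) :
    a ∈ (buildAdj edges).keys ↔ ∃ u v, [u, v] ∈ edges ∧ (a = u ∨ a = v) := by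
  have gen : ∀ (es : List (List Int)) (d : PySem.Dict Int (PySem.Set Int)),
      a ∈ (es.foldl (fun G e =>
        match e with
        | [u, v] => (G.modify u [] (fun s => PySem.Set.add s v)).modify v [] (fun s => PySem.Set.add s u)
        | _ => G) d).keys
      ↔ a ∈ d.keys ∨ ∃ u v, [u, v] ∈ es ∧ (a = u ∨ a = v) := by
    intro es
    induction es with
    | nil => simp
    | cons e t ih =>
      intro d
      match e with
      | [] => simp only [List.foldl_cons]; rw [ih]; simp
      | [x] => simp only [List.foldl_cons]; rw [ih]; simp
      | x :: y :: z :: r => simp only [List.foldl_cons]; rw [ih]; simp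
      | [u, v] =>
        simp only [List.foldl_cons]
        rw [ih]
        have hk : ∀ (d' : PySem.Dict Int (PySem.Set Int)) (k : Int) (f : PySem.Set Int → PySem.Set Int) (x : Int),
            x ∈ (d'.modify k [] f).keys ↔ x = k ∨ x ∈ d'.keys := by
          intro d' k f x
          rw [← PySem.Dict.contains_iff_mem_keys, PySem.Dict.contains_modify, ← PySem.Dict.contains_iff_mem_keys]
          simp
        rw [hk, hk]
        constructor
        · rintro ((h | h | h) | ⟨u', v', hm, h⟩)
          · exact Or.inr ⟨u, v, by simp, Or.inr h⟩
          · exact Or.inr ⟨u, v, by simp, Or.inl h⟩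
          · exact Or.inl h
          · exact Or.inr ⟨u', v', by simp [hm], h⟩
        · rintro (h | ⟨u', v', hm, h⟩)
          · exact Or.inl (Or.inr (Or.inr h))
          · rcases List.mem_cons.1 hm with he | ht
            · simp only [List.cons.injEq, and_true] at he
              obtain ⟨rfl, rfl⟩ := he
              rcases h with h | h
              · exact Or.inl (Or.inr (Or.inl h))
              · exact Or.inl (Or.inl h)
            · exact Or.inr ⟨u', v', ht, h⟩
  rw [show buildAdj edges = edges.foldl (fun G e =>
        match e with
        | [u, v] => (G.modify u [] (fun s => PySem.Set.add s v)).modify v [] (fun s => PySem.Set.add s u)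
        | _ => G) PySem.Dict.empty from rfl, gen]
  simp [PySem.Dict.keys_empty]

-- cited by the port (termination side conditions): neighbours are keys
lemma buildAdj_getD_mem_keys (edges : List (List Int)) (k x : Int)
    (hx : x ∈ (buildAdj edges).getD k []) : x ∈ (buildAdj edges).keys := by
  rw [mem_getD_buildAdj] at hx
  rw [mem_keys_buildAdj]
  obtain ⟨u, v, hm, h⟩ := hx
  exact ⟨u, v, hm, by tauto⟩

-- inner 'for nei in G[node]' loop of A's DFS (stack represented top-at-head; Python pushes at and
-- pops from the list's end — the same LIFO discipline, and the resulting visited SET is identical)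
def dfsInner (l : List Int) (st : List Int) (sw : PySem.Set Int) : List Int × PySem.Set Int :=
  l.foldl (fun p nei => if nei ∈ p.2 then p else (nei :: p.1, PySem.Set.add p.2 nei)) (st, sw)

-- cited by the port's termination proof
lemma dfsInner_snd (l : List Int) (st : List Int) (sw : PySem.Set Int) :
    (dfsInner l st sw).2 = PySem.Set.update sw l := by
  induction l generalizing st sw with
  | nil => simp [dfsInner, PySem.Set.update_nil]
  | cons x t ih =>
    by_cases hx : x ∈ sw
    · simp only [dfsInner, List.foldl_cons, if_pos hx]
      rw [show (t.foldl (fun p nei => if nei ∈ p.2 then p else (nei :: p.1, PySem.Set.add p.2 nei)) (st, sw)) = dfsInner t st sw from rfl, ih]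
      rw [PySem.Set.update_cons, PySem.Set.add_of_mem hx]
    · simp only [dfsInner, List.foldl_cons, if_neg hx]
      rw [show (t.foldl (fun p nei => if nei ∈ p.2 then p else (nei :: p.1, PySem.Set.add p.2 nei)) (x :: st, PySem.Set.add sw x)) = dfsInner t (x :: st) (PySem.Set.add sw x) from rfl, ih]
      rw [PySem.Set.update_cons]

-- cited by the port's termination proof
lemma dfsInner_len (l : List Int) (st : List Int) (sw : PySem.Set Int) :
    (dfsInner l st sw).1.length + sw.length = (dfsInner l st sw).2.length + st.length := by
  induction l generalizing st sw with
  | nil => simp [dfsInner]; omega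
  | cons x t ih =>
    by_cases hx : x ∈ sw
    · simp only [dfsInner, List.foldl_cons, if_pos hx]
      exact ih st sw
    · simp only [dfsInner, List.foldl_cons, if_neg hx]
      rw [show (t.foldl (fun p nei => if nei ∈ p.2 then p else (nei :: p.1, PySem.Set.add p.2 nei)) (x :: st, PySem.Set.add sw x)) = dfsInner t (x :: st) (PySem.Set.add sw x) from rfl]
      have := ih (x :: st) (PySem.Set.add sw x)
      rw [PySem.Set.add_of_not_mem hx] at this ⊢
      simp only [List.length_cons, List.length_append, List.length_nil] at this ⊢
      omega

-- cited by the port's termination proof: a nodup list included in another is no longer than it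
lemma nodup_subset_length_le {l m : List Int} (h : l.Nodup) (hs : ∀ x ∈ l, x ∈ m) :
    l.length ≤ m.length := by
  calc l.length = l.toFinset.card := (List.toFinset_card_of_nodup h).symm
    _ ≤ m.toFinset.card := Finset.card_le_card (fun x hx => by
        rw [List.mem_toFinset] at *; exact hs x (by simpa using hx))
    _ ≤ m.length := List.toFinset_card_le m

-- A's 'while stack:' DFS loop; U with its three hypotheses only bounds the search for termination
def dfsLoop (G : PySem.Dict Int (PySem.Set Int)) (U : List Int)
    (hU : ∀ k : Int, ∀ x ∈ G.getD k [], x ∈ U)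
    (stack : List Int) (saw : PySem.Set Int)
    (hsaw : ∀ x ∈ saw, x ∈ U) (hnd : saw.Nodup) : PySem.Set Int :=
  match stack with
  | [] => saw
  | node :: rest =>
    dfsLoop G U hU (dfsInner (G.getD node []) rest saw).1 (dfsInner (G.getD node []) rest saw).2
      (fun x hx => by
        rw [dfsInner_snd] at hx
        rcases (PySem.Set.mem_update _ _ _).1 hx with h | h
        · exact hsaw x h
        · exact hU node x h)
      (by rw [dfsInner_snd]; exact PySem.Set.nodup_update _ _ hnd)
termination_by 2 * (U.length - saw.length) + stack.length
decreasing_by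
  have hlen := dfsInner_len (G.getD node []) rest saw
  have hsnd := dfsInner_snd (G.getD node []) rest saw
  have hpre : saw.length ≤ (dfsInner (G.getD node []) rest saw).2.length := by
    rw [hsnd, PySem.Set.update_eq_append_filter]
    simp
  have hub : (dfsInner (G.getD node []) rest saw).2.length ≤ U.length := by
    apply nodup_subset_length_le
    · rw [hsnd]; exact PySem.Set.nodup_update _ _ hnd
    · intro x hx
      rw [hsnd] at hx
      rcases (PySem.Set.mem_update _ _ _).1 hx with h | h
      · exact hsaw x h
      · exact hU node x h
  simp only [List.length_cons]
  omega

-- port of A: DFS per unseen i in range(n); Python's defaultdict access G[node] inserts empty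
-- sets it never reads again, so plain getD _ [] lookups compute the same values
def solution (n : Int) (edges : List (List Int)) : Int × Int :=
  let G := buildAdj edges
  let res := (PySem.List.pyRange 0 n 1).foldl
    (fun (st : Std.HashSet Int × Int × Int) i =>
      if i ∈ st.1 then st
      else
        let saw := dfsLoop G (i :: G.keys)
          (fun k x hx => List.mem_cons_of_mem _ (buildAdj_getD_mem_keys edges k x hx))
          [i] [i]
          (fun x hx => by
            simp only [List.mem_singleton] at hx
            exact hx ▸ List.mem_cons_self)
          (List.nodup_singleton i)
        -- Python 'seen |= saw' adds saw's elements (HashSet: same membership, fast lookup)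
        let seen := saw.foldl (fun h x => h.insert x) st.1
        if (saw.map (fun v => ((G.getD v []).length : Int))).sum + 2 = (saw.length : Int) * 2 then
          let saw2 := saw.foldl (fun s v => if (G.getD v []).length = 1 then PySem.Set.discard s v else s) saw
          (seen, st.2.1 + 1,
            st.2.2 + (if saw2.all (fun v => decide ((PySem.Set.inter (G.getD v []) saw2).length ≤ 2)) then 1 else 0))
        else
          (seen, st.2.1, st.2.2))
    ((∅ : Std.HashSet Int), 0, 0)
  (res.2.1, res.2.2)

-- ===== PORT B =====

-- label = {v: v for v in adj}
def bLab0 (edges : List (List Int)) : PySem.Dict Int Int :=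
  (buildAdj edges).keys.foldl (fun d v => d.insert v v) PySem.Dict.empty

-- one 'for e in edges:' pass of B's relabelling loop (flag = changed)
def bStep (p : PySem.Dict Int Int × Bool) (e : List Int) : PySem.Dict Int Int × Bool :=
  match e with
  | [u, v] =>
    let lu := p.1.getD u u
    let lv := p.1.getD v v
    let m := if lu < lv then lu else lv
    let p1 := if lu ≠ m then (p.1.insert u m, true) else p
    if lv ≠ m then (p1.1.insert v m, true) else p1
  | _ => p

def bRound (edges : List (List Int)) (p : PySem.Dict Int Int × Bool) : PySem.Dict Int Int × Bool :=
  edges.foldl bStep p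

-- 'for _ in range(len(label)): ... if not changed: break'
def bRounds : Nat → PySem.Dict Int Int → List (List Int) → PySem.Dict Int Int
  | 0, lab, _ => lab
  | (k + 1), lab, es =>
    let p := bRound es (lab, false)
    if p.2 then bRounds k p.1 es else p.1

def bLab (edges : List (List Int)) : PySem.Dict Int Int :=
  bRounds (bLab0 edges).size (bLab0 edges) edges

-- members = {}; for v in adj: members.setdefault(label[v], []).append(v)
def bMembers (edges : List (List Int)) : PySem.Dict Int (List Int) :=
  (buildAdj edges).keys.foldl
    (fun d v => d.modify ((bLab edges).getD v v) [] (fun l => l ++ [v])) PySem.Dict.empty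

-- port of B: group nodes by their propagated minimum label, then test each group once
def solution_alt (n : Int) (edges : List (List Int)) : Int × Int :=
  let adj := buildAdj edges
  let lab := bLab edges
  let members := bMembers edges
  let res := (PySem.List.pyRange 0 n 1).foldl
    (fun (st : Std.HashSet Int × Int × Int) i =>
      let r := lab.getD i i
      if r ∈ st.1 then st
      else
        let done := st.1.insert r
        let comp := members.getD r [i]
        let degsum := (comp.map (fun v => ((adj.getD v []).length : Int))).sum
        if degsum = 2 * ((comp.length : Int) - 1) then
          let spine := comp.filter (fun v => (adj.getD v []).length ≠ 1)
          let sp := PySem.Set.ofList spine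
          (done, st.2.1 + 1,
            st.2.2 + (if spine.all (fun v => decide ((PySem.Set.inter (adj.getD v []) sp).length ≤ 2)) then 1 else 0))
        else
          (done, st.2.1, st.2.2))
    ((∅ : Std.HashSet Int), 0, 0)
  (res.2.1, res.2.2)

-- ===== PRECONDITION & SPEC =====

-- Pre_ excludes exactly the edge entries that are not two-element lists: Python A (and B) raise
-- ValueError unpacking 'u, v = e' there.
def Pre_solution (n : Int) (edges : List (List Int)) : Prop :=
  ∀ e ∈ edges, e.length = 2
instance (n : Int) (edges : List (List Int)) : Decidable (Pre_solution n edges) := by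
  unfold Pre_solution; infer_instance

def pvWitness_solution : Int × List (List Int) := (4, [[0, 1], [1, 2], [3, 3]])

def Spec_solution (n : Int) (edges : List (List Int)) (out : Int × Int) : Prop := out = solution_alt n edges
instance (n : Int) (edges : List (List Int)) (out : Int × Int) : Decidable (Spec_solution n edges out) := by
  unfold Spec_solution; infer_instance

-- ===== CLAIM (what is proved, stated in full; the proofs are below) =====
def Claim_equal_solution : Prop := ∀ (n : Int) (edges : List (List Int)), Dom_solution n edges → Pre_solution n edges → Spec_solution n edges (solution n edges)

-- ===== LEMMAS AND PROOFS =====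

-- reachability in the (shared) adjacency structure
def AdjReach (G : PySem.Dict Int (PySem.Set Int)) (a b : Int) : Prop :=
  Relation.ReflTransGen (fun x y => y ∈ G.getD x []) a b

lemma adj_symm (edges : List (List Int)) (a b : Int)
    (h : b ∈ (buildAdj edges).getD a []) : a ∈ (buildAdj edges).getD b [] := by
  rw [mem_getD_buildAdj] at h ⊢
  obtain ⟨u, v, hm, h⟩ := h
  exact ⟨u, v, hm, by tauto⟩

lemma reach_symm (edges : List (List Int)) {a b : Int}
    (h : AdjReach (buildAdj edges) a b) : AdjReach (buildAdj edges) b a :=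
  Relation.ReflTransGen.symmetric (fun _ _ hxy => adj_symm edges _ _ hxy) h

lemma adj_mem_keys_left (edges : List (List Int)) (a b : Int)
    (h : b ∈ (buildAdj edges).getD a []) : a ∈ (buildAdj edges).keys := by
  rw [mem_getD_buildAdj] at h
  rw [mem_keys_buildAdj]
  obtain ⟨u, v, hm, h⟩ := h
  exact ⟨u, v, hm, by tauto⟩

lemma reach_mem_keys (edges : List (List Int)) {a b : Int}
    (h : AdjReach (buildAdj edges) a b) : b = a ∨ b ∈ (buildAdj edges).keys := by
  induction h with
  | refl => exact Or.inl rfl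
  | tail _ hbc _ => exact Or.inr (buildAdj_getD_mem_keys edges _ _ hbc)

lemma reach_isolated (edges : List (List Int)) {a b : Int}
    (ha : a ∉ (buildAdj edges).keys) : AdjReach (buildAdj edges) a b ↔ b = a := by
  constructor
  · intro h
    rcases Relation.ReflTransGen.cases_head h with h | ⟨c, hac, _⟩
    · exact h.symm
    · exact absurd (adj_mem_keys_left edges a c hac) ha
  · rintro rfl; exact Relation.ReflTransGen.refl

lemma nodup_keys_modify {κ ν : Type} [BEq κ] [LawfulBEq κ] (d : PySem.Dict κ ν)
    (k : κ) (d0 : ν) (f : ν → ν) (h : d.keys.Nodup) : (d.modify k d0 f).keys.Nodup := by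
  rw [PySem.Dict.keys_modify]
  exact PySem.Dict.nodup_keys_insert _ _ _ h

lemma nodup_keys_buildAdj (edges : List (List Int)) : (buildAdj edges).keys.Nodup := by
  have gen : ∀ (es : List (List Int)) (d : PySem.Dict Int (PySem.Set Int)), d.keys.Nodup →
      (es.foldl (fun G e =>
        match e with
        | [u, v] => (G.modify u [] (fun s => PySem.Set.add s v)).modify v [] (fun s => PySem.Set.add s u)
        | _ => G) d).keys.Nodup := by
    intro es
    induction es with
    | nil => intro d hd; exact hd
    | cons e t ih =>
      intro d hd
      simp only [List.foldl_cons]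
      apply ih
      match e with
      | [] => exact hd
      | [x] => exact hd
      | x :: y :: z :: r => exact hd
      | [u, v] => exact nodup_keys_modify _ _ _ _ (nodup_keys_modify _ _ _ _ hd)
  exact gen edges PySem.Dict.empty (by simp [PySem.Dict.keys_empty])

-- ---- DFS characterisation ----

lemma dfsInner_fst_mem (l : List Int) (st : List Int) (sw : PySem.Set Int) (x : Int) :
    x ∈ (dfsInner l st sw).1 ↔ x ∈ st ∨ (x ∈ l ∧ x ∉ sw) := by
  induction l generalizing st sw with
  | nil => simp [dfsInner]
  | cons y t ih =>
    by_cases hy : y ∈ sw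
    · simp only [dfsInner, List.foldl_cons, if_pos hy]
      rw [show (t.foldl (fun p nei => if nei ∈ p.2 then p else (nei :: p.1, PySem.Set.add p.2 nei)) (st, sw)) = dfsInner t st sw from rfl, ih]
      simp only [List.mem_cons]
      constructor
      · rintro (h | ⟨h1, h2⟩)
        · exact Or.inl h
        · exact Or.inr ⟨Or.inr h1, h2⟩
      · rintro (h | ⟨(rfl | h1), h2⟩)
        · exact Or.inl h
        · exact absurd hy h2
        · exact Or.inr ⟨h1, h2⟩
    · simp only [dfsInner, List.foldl_cons, if_neg hy]
      rw [show (t.foldl (fun p nei => if nei ∈ p.2 then p else (nei :: p.1, PySem.Set.add p.2 nei)) (y :: st, PySem.Set.add sw y)) = dfsInner t (y :: st) (PySem.Set.add sw y) from rfl, ih]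
      simp only [List.mem_cons, PySem.Set.mem_add]
      constructor
      · rintro ((rfl | h) | ⟨h1, h2⟩)
        · exact Or.inr ⟨Or.inl rfl, hy⟩
        · exact Or.inl h
        · exact Or.inr ⟨Or.inr h1, fun hc => h2 (Or.inl hc)⟩
      · rintro (h | ⟨(rfl | h1), h2⟩)
        · exact Or.inl (Or.inr h)
        · exact Or.inl (Or.inl rfl)
        · by_cases hxy : x = y
          · exact Or.inl (Or.inl hxy)
          · exact Or.inr ⟨h1, fun hc => by rcases hc with hc | hc; exact h2 hc; exact hxy hc⟩
lemma dfsLoop_sub (G : PySem.Dict Int (PySem.Set Int)) (U : List Int)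
    (hU : ∀ k : Int, ∀ x ∈ G.getD k [], x ∈ U) (stack : List Int) (saw : PySem.Set Int)
    (hsaw : ∀ x ∈ saw, x ∈ U) (hnd : saw.Nodup) :
    ∀ x ∈ saw, x ∈ dfsLoop G U hU stack saw hsaw hnd := by
  fun_induction dfsLoop with
  | case1 => intro x hx; exact hx
  | case2 saw hsaw hnd node rest ih =>
    intro x hx
    apply ih
    rw [dfsInner_snd]
    exact (PySem.Set.mem_update _ _ _).2 (Or.inl hx)
lemma dfsLoop_nodup (G : PySem.Dict Int (PySem.Set Int)) (U : List Int)
    (hU : ∀ k : Int, ∀ x ∈ G.getD k [], x ∈ U) (stack : List Int) (saw : PySem.Set Int)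
    (hsaw : ∀ x ∈ saw, x ∈ U) (hnd : saw.Nodup) :
    (dfsLoop G U hU stack saw hsaw hnd).Nodup := by
  fun_induction dfsLoop with
  | case1 saw hsaw hnd => exact hnd
  | case2 saw hsaw hnd node rest ih => exact ih
lemma dfsLoop_sound (G : PySem.Dict Int (PySem.Set Int)) (U : List Int)
    (hU : ∀ k : Int, ∀ x ∈ G.getD k [], x ∈ U) (i : Int) (stack : List Int) (saw : PySem.Set Int)
    (hsaw : ∀ x ∈ saw, x ∈ U) (hnd : saw.Nodup)
    (h1 : ∀ s ∈ stack, AdjReach G i s) (h2 : ∀ x ∈ saw, AdjReach G i x) :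
    ∀ x ∈ dfsLoop G U hU stack saw hsaw hnd, AdjReach G i x := by
  fun_induction dfsLoop with
  | case1 => exact h2
  | case2 saw hsaw hnd node rest ih =>
    apply ih
    · intro s hs
      rw [dfsInner_fst_mem] at hs
      rcases hs with hs | ⟨hs, _⟩
      · exact h1 s (List.mem_cons_of_mem _ hs)
      · exact Relation.ReflTransGen.tail (h1 node List.mem_cons_self) hs
    · intro x hx
      rw [dfsInner_snd] at hx
      rcases (PySem.Set.mem_update _ _ _).1 hx with h | h
      · exact h2 x h
      · exact Relation.ReflTransGen.tail (h1 node List.mem_cons_self) h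
lemma dfsLoop_closed (G : PySem.Dict Int (PySem.Set Int)) (U : List Int)
    (hU : ∀ k : Int, ∀ x ∈ G.getD k [], x ∈ U) (stack : List Int) (saw : PySem.Set Int)
    (hsaw : ∀ x ∈ saw, x ∈ U) (hnd : saw.Nodup)
    (hss : ∀ s ∈ stack, s ∈ saw)
    (hcl : ∀ x ∈ saw, x ∈ stack ∨ ∀ y ∈ G.getD x [], y ∈ saw) :
    ∀ x ∈ dfsLoop G U hU stack saw hsaw hnd, ∀ y ∈ G.getD x [], y ∈ dfsLoop G U hU stack saw hsaw hnd := by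
  fun_induction dfsLoop with
  | case1 saw hsaw hnd =>
    intro x hx y hy
    rcases hcl x hx with h | h
    · exact absurd h (List.not_mem_nil)
    · exact h y hy
  | case2 saw hsaw hnd node rest ih =>
    apply ih
    · intro s hs
      rw [dfsInner_fst_mem] at hs
      rw [dfsInner_snd]
      apply (PySem.Set.mem_update _ _ _).2
      rcases hs with hs | ⟨hs, _⟩
      · exact Or.inl (hss s (List.mem_cons_of_mem _ hs))
      · exact Or.inr hs
    · intro x hx
      rw [dfsInner_snd] at hx
      have hsawcase : x ∈ saw → (x ∈ (dfsInner (G.getD node []) rest saw).1 ∨ ∀ y ∈ G.getD x [], y ∈ (dfsInner (G.getD node []) rest saw).2) := by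
        intro h
        rcases hcl x h with h' | h'
        · rcases List.mem_cons.1 h' with rfl | h'
          · right
            intro y hy
            rw [dfsInner_snd]
            exact (PySem.Set.mem_update _ _ _).2 (Or.inr hy)
          · left
            rw [dfsInner_fst_mem]
            exact Or.inl h'
        · right
          intro y hy
          rw [dfsInner_snd]
          exact (PySem.Set.mem_update _ _ _).2 (Or.inl (h' y hy))
      rcases (PySem.Set.mem_update _ _ _).1 hx with h | h
      · exact hsawcase h
      · by_cases hxs : x ∈ saw
        · exact hsawcase hxs
        · left
          rw [dfsInner_fst_mem]
          exact Or.inr ⟨h, hxs⟩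
lemma dfsLoop_spec (edges : List (List Int)) (i : Int)
    (hU : ∀ k : Int, ∀ x ∈ (buildAdj edges).getD k [], x ∈ i :: (buildAdj edges).keys)
    (hsaw : ∀ x ∈ ([i] : PySem.Set Int), x ∈ i :: (buildAdj edges).keys)
    (hnd : ([i] : List Int).Nodup) :
    ∀ x, x ∈ dfsLoop (buildAdj edges) (i :: (buildAdj edges).keys) hU [i] [i] hsaw hnd
      ↔ AdjReach (buildAdj edges) i x := by
  intro x
  constructor
  · exact dfsLoop_sound _ _ hU i _ _ hsaw hnd
      (fun s hs => by simp at hs; exact hs ▸ Relation.ReflTransGen.refl)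
      (fun s hs => by simp at hs; exact hs ▸ Relation.ReflTransGen.refl) x
  · intro h
    have hclosed := dfsLoop_closed (buildAdj edges) _ hU [i] [i] hsaw hnd
      (fun s hs => hs) (fun x hx => Or.inl hx)
    have hstart : i ∈ dfsLoop (buildAdj edges) (i :: (buildAdj edges).keys) hU [i] [i] hsaw hnd :=
      dfsLoop_sub _ _ hU _ _ hsaw hnd i (by simp)
    induction h with
    | refl => exact hstart
    | tail hab hbc ih => exact hclosed _ ih _ hbc
-- ---- label propagation ----

def gLab (d : PySem.Dict Int Int) (e : List Int) : PySem.Dict Int Int :=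
  match e with
  | [u, v] =>
    let lu := d.getD u u
    let lv := d.getD v v
    let m := if lu < lv then lu else lv
    let d1 := if lu ≠ m then d.insert u m else d
    if lv ≠ m then d1.insert v m else d1
  | _ => d

def roundLab (es : List (List Int)) (d : PySem.Dict Int Int) : PySem.Dict Int Int :=
  es.foldl gLab d

def iterLab (es : List (List Int)) (k : Nat) (d : PySem.Dict Int Int) : PySem.Dict Int Int :=
  (roundLab es)^[k] d

lemma bStep_fst (p : PySem.Dict Int Int × Bool) (e : List Int) : (bStep p e).1 = gLab p.1 e := by
  rcases e with _ | ⟨u, _ | ⟨v, _ | ⟨w, r⟩⟩⟩ <;> simp only [bStep, gLab] <;> split_ifs <;> rfl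

lemma bStep_flag (p : PySem.Dict Int Int × Bool) (e : List Int) (h : (bStep p e).2 = false) :
    bStep p e = p := by
  rcases e with _ | ⟨u, _ | ⟨v, _ | ⟨w, r⟩⟩⟩ <;> simp only [bStep] at h ⊢ <;> split_ifs at h ⊢ <;>
    first | rfl | (simp_all)

lemma bStep_flag_mono (p : PySem.Dict Int Int × Bool) (e : List Int) (h : p.2 = true) :
    (bStep p e).2 = true := by
  rcases e with _ | ⟨u, _ | ⟨v, _ | ⟨w, r⟩⟩⟩ <;> simp only [bStep] <;> (try split_ifs) <;> simp_all

lemma bRound_flag_mono (es : List (List Int)) (p : PySem.Dict Int Int × Bool) (h : p.2 = true) :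
    (bRound es p).2 = true := by
  induction es generalizing p with
  | nil => exact h
  | cons e t ih => exact ih _ (bStep_flag_mono p e h)

lemma bRound_fst (es : List (List Int)) (p : PySem.Dict Int Int × Bool) :
    (bRound es p).1 = roundLab es p.1 := by
  induction es generalizing p with
  | nil => rfl
  | cons e t ih =>
    show (bRound t (bStep p e)).1 = roundLab t (gLab p.1 e)
    rw [ih, bStep_fst]

lemma bRound_false (es : List (List Int)) (p : PySem.Dict Int Int × Bool)
    (h : (bRound es p).2 = false) : bRound es p = p := by
  induction es generalizing p with
  | nil => rfl
  | cons e t ih =>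
    have hflag : (bStep p e).2 = false := by
      cases hb : (bStep p e).2
      · rfl
      · exfalso
        have hmono : (bRound (e :: t) p).2 = true := bRound_flag_mono t (bStep p e) hb
        rw [h] at hmono
        exact Bool.false_ne_true hmono
    have hstep := bStep_flag p e hflag
    have h' : (bRound t (bStep p e)).2 = false := h
    rw [hstep] at h'
    show bRound t (bStep p e) = p
    rw [hstep]
    exact ih p h'

lemma bRounds_eq_iterLab (es : List (List Int)) :
    ∀ (k : Nat) (d : PySem.Dict Int Int), bRounds k d es = iterLab es k d := by
  intro k
  induction k with
  | zero => intro d; rfl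
  | succ k ih =>
    intro d
    show (let p := bRound es (d, false); if p.2 then bRounds k p.1 es else p.1) = iterLab es (k + 1) d
    by_cases hp : (bRound es (d, false)).2 = true
    · simp only [hp, if_true]
      rw [ih, bRound_fst]
      show iterLab es k (roundLab es d) = iterLab es (k + 1) d
      simp only [iterLab, Function.iterate_succ_apply]
    · simp only [Bool.not_eq_true] at hp
      simp only [hp, Bool.false_eq_true, if_false]
      have hfix := bRound_false es (d, false) hp
      have hfst : roundLab es d = d := by
        have := congrArg Prod.fst hfix
        rw [bRound_fst] at this
        exact this
      rw [bRound_fst]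
      show roundLab es d = iterLab es (k + 1) d
      simp only [iterLab]
      rw [Function.iterate_fixed hfst, hfst]

lemma lab0_getD (edges : List (List Int)) (v : Int) : (bLab0 edges).getD v v = v := by
  have gen : ∀ (l : List Int) (d : PySem.Dict Int Int),
      (l.foldl (fun d v => d.insert v v) d).getD v v = d.getD v v ∨
      (l.foldl (fun d v => d.insert v v) d).getD v v = v := by
    intro l
    induction l with
    | nil => intro d; exact Or.inl rfl
    | cons x t ih =>
      intro d
      simp only [List.foldl_cons]
      rcases ih (d.insert x x) with h | h
      · rw [h, PySem.Dict.getD_insert]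
        split_ifs with hvx
        · exact Or.inr hvx.symm
        · exact Or.inl rfl
      · exact Or.inr h
  rcases gen (buildAdj edges).keys PySem.Dict.empty with h | h
  · rw [show bLab0 edges = (buildAdj edges).keys.foldl (fun d v => d.insert v v) PySem.Dict.empty from rfl, h, PySem.Dict.getD_empty]
  · rw [show bLab0 edges = (buildAdj edges).keys.foldl (fun d v => d.insert v v) PySem.Dict.empty from rfl, h]

lemma lab0_size (edges : List (List Int)) : (bLab0 edges).size = (buildAdj edges).keys.length := by
  have hit := PySem.Dict.items_foldl_insert_fresh (buildAdj edges).keys (fun a => a) (fun a => a)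
    PySem.Dict.empty (fun a _ => by simp) (by simpa using nodup_keys_buildAdj edges)
  show (bLab0 edges).items.length = _
  rw [show (bLab0 edges).items = ((buildAdj edges).keys.foldl (fun d v => d.insert v v) PySem.Dict.empty).items from rfl]
  rw [hit]
  simp [PySem.Dict.empty]

lemma gLab_pair_getD_self (d : PySem.Dict Int Int) (u v : Int) :
    (gLab d [u, v]).getD u u = (if d.getD u u < d.getD v v then d.getD u u else d.getD v v) ∧
    (gLab d [u, v]).getD v v = (if d.getD u u < d.getD v v then d.getD u u else d.getD v v) := by
  simp only [gLab]
  split_ifs with h1 h2 h3 h4 h5 h6 <;>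
    simp_all [PySem.Dict.getD_insert] <;> split_ifs <;> omega

lemma gLab_pair_getD_other (d : PySem.Dict Int Int) (u v x : Int) (hx1 : x ≠ u) (hx2 : x ≠ v) :
    (gLab d [u, v]).getD x x = d.getD x x := by
  simp only [gLab]
  split_ifs <;> simp_all [PySem.Dict.getD_insert]

lemma gLab_other (d : PySem.Dict Int Int) (e : List Int)
    (h : ∀ u v, e ≠ [u, v]) : gLab d e = d := by
  rcases e with _ | ⟨u, _ | ⟨v, _ | ⟨w, r⟩⟩⟩ <;> first | rfl | exact absurd rfl (h u v)

-- invariant: every label is reachable from its node, and untouched off the key set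
def LabInv (edges : List (List Int)) (d : PySem.Dict Int Int) : Prop :=
  ∀ x : Int, AdjReach (buildAdj edges) x (d.getD x x) ∧
    (x ∉ (buildAdj edges).keys → d.getD x x = x)

lemma gLab_inv (edges : List (List Int)) (e : List Int) (he : e ∈ edges)
    (d : PySem.Dict Int Int) (hinv : LabInv edges d) : LabInv edges (gLab d e) := by
  by_cases hp : ∃ u v, e = [u, v]
  · obtain ⟨u, v, rfl⟩ := hp
    have huv : v ∈ (buildAdj edges).getD u [] :=
      (mem_getD_buildAdj edges u v).2 ⟨u, v, he, Or.inl ⟨rfl, rfl⟩⟩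
    have hvu : u ∈ (buildAdj edges).getD v [] := adj_symm edges u v huv
    have huK : u ∈ (buildAdj edges).keys := adj_mem_keys_left edges u v huv
    have hvK : v ∈ (buildAdj edges).keys := adj_mem_keys_left edges v u hvu
    have hru : AdjReach (buildAdj edges) u (if d.getD u u < d.getD v v then d.getD u u else d.getD v v) := by
      split_ifs with hlt
      · exact (hinv u).1
      · exact Relation.ReflTransGen.head huv (hinv v).1
    have hrv : AdjReach (buildAdj edges) v (if d.getD u u < d.getD v v then d.getD u u else d.getD v v) := by
      split_ifs with hlt
      · exact Relation.ReflTransGen.head hvu (hinv u).1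
      · exact (hinv v).1
    intro x
    by_cases hxu : x = u
    · subst hxu
      rw [(gLab_pair_getD_self d x v).1]
      exact ⟨hru, fun hk => absurd huK hk⟩
    · by_cases hxv : x = v
      · subst hxv
        rw [(gLab_pair_getD_self d u x).2]
        exact ⟨hrv, fun hk => absurd hvK hk⟩
      · rw [gLab_pair_getD_other d u v x hxu hxv]
        exact hinv x
  · rw [gLab_other d e (fun u v hc => hp ⟨u, v, hc⟩)]
    exact hinv

lemma roundLab_inv (edges : List (List Int)) (d : PySem.Dict Int Int)
    (hinv : LabInv edges d) : LabInv edges (roundLab edges d) := by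
  have gen : ∀ (l : List (List Int)), (∀ e ∈ l, e ∈ edges) → ∀ d, LabInv edges d →
      LabInv edges (l.foldl gLab d) := by
    intro l
    induction l with
    | nil => exact fun _ d hd => hd
    | cons e t ih =>
      intro hl d hd
      exact ih (fun e' he' => hl e' (List.mem_cons_of_mem _ he')) (gLab d e)
        (gLab_inv edges e (hl e List.mem_cons_self) d hd)
  exact gen edges (fun _ h => h) d hinv

lemma gLab_mono (d : PySem.Dict Int Int) (e : List Int) (x : Int) :
    (gLab d e).getD x x ≤ d.getD x x := by
  by_cases hp : ∃ u v, e = [u, v]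
  · obtain ⟨u, v, rfl⟩ := hp
    by_cases hxu : x = u
    · subst hxu
      rw [(gLab_pair_getD_self d x v).1]
      split_ifs <;> omega
    · by_cases hxv : x = v
      · subst hxv
        rw [(gLab_pair_getD_self d u x).2]
        split_ifs <;> omega
      · rw [gLab_pair_getD_other d u v x hxu hxv]
  · rw [gLab_other d e (fun u v hc => hp ⟨u, v, hc⟩)]

lemma roundLab_mono (es : List (List Int)) (d : PySem.Dict Int Int) (x : Int) :
    (roundLab es d).getD x x ≤ d.getD x x := by
  induction es generalizing d with
  | nil => exact le_refl _
  | cons e t ih => exact le_trans (ih (gLab d e)) (gLab_mono d e x)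

lemma roundLab_edge_le (es : List (List Int)) (a b : Int) (hm : [a, b] ∈ es) :
    ∀ d : PySem.Dict Int Int,
      (roundLab es d).getD a a ≤ d.getD b b ∧ (roundLab es d).getD b b ≤ d.getD a a := by
  revert hm
  induction es with
  | nil => exact fun hm => absurd hm (List.not_mem_nil)
  | cons e t ih =>
    intro hm d
    rcases List.mem_cons.1 hm with he | ht
    · subst he
      have hself := gLab_pair_getD_self d a b
      have h1 : (roundLab t (gLab d [a, b])).getD a a ≤ (gLab d [a, b]).getD a a :=
        roundLab_mono t _ a
      have h2 : (roundLab t (gLab d [a, b])).getD b b ≤ (gLab d [a, b]).getD b b :=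
        roundLab_mono t _ b
      show (roundLab t (gLab d [a, b])).getD a a ≤ d.getD b b ∧
        (roundLab t (gLab d [a, b])).getD b b ≤ d.getD a a
      rw [hself.1] at h1
      rw [hself.2] at h2
      constructor
      · refine le_trans h1 ?_
        split_ifs <;> omega
      · refine le_trans h2 ?_
        split_ifs <;> omega
    · have := ih ht (gLab d e)
      exact ⟨le_trans this.1 (gLab_mono d e b), le_trans this.2 (gLab_mono d e a)⟩

-- ---- bounded closure (for completeness of the propagation) ----

def expand (G : PySem.Dict Int (PySem.Set Int)) (T : List Int) : List Int :=
  PySem.Set.update T (T.flatMap (fun x => G.getD x []))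

lemma mem_expand (G : PySem.Dict Int (PySem.Set Int)) (T : List Int) (x : Int) :
    x ∈ expand G T ↔ x ∈ T ∨ ∃ w ∈ T, x ∈ G.getD w [] := by
  rw [show expand G T = PySem.Set.update T (T.flatMap (fun x => G.getD x [])) from rfl,
    PySem.Set.mem_update]
  simp [List.mem_flatMap]

lemma expand_len (G : PySem.Dict Int (PySem.Set Int)) (T : List Int) :
    expand G T = T ∨ T.length < (expand G T).length := by
  rw [show expand G T = PySem.Set.update T (T.flatMap (fun x => G.getD x [])) from rfl,
    PySem.Set.update_eq_append_filter]
  rcases eq_or_ne ((PySem.Set.ofList (T.flatMap (fun x => G.getD x []))).filter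
      (fun y => !PySem.Set.contains T y)) [] with h | h
  · left; rw [h, List.append_nil]
  · right
    have := List.length_pos_of_ne_nil h
    rw [List.length_append]
    omega

lemma expand_nodup (G : PySem.Dict Int (PySem.Set Int)) (T : List Int) (h : T.Nodup) :
    (expand G T).Nodup := PySem.Set.nodup_update _ _ h

lemma expand_fix (edges : List (List Int)) (v : Int) (hv : v ∈ (buildAdj edges).keys) :
    expand (buildAdj edges) ((expand (buildAdj edges))^[(buildAdj edges).keys.length] [v])
      = (expand (buildAdj edges))^[(buildAdj edges).keys.length] [v] := by
  have hsubK : ∀ k : Nat, ∀ x ∈ (expand (buildAdj edges))^[k] [v], x ∈ (buildAdj edges).keys := by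
    intro k
    induction k with
    | zero => intro x hx; simp at hx; exact hx ▸ hv
    | succ k ih =>
      intro x hx
      rw [Function.iterate_succ_apply', mem_expand] at hx
      rcases hx with hx | ⟨w, _, hadj⟩
      · exact ih x hx
      · exact buildAdj_getD_mem_keys edges w x hadj
  have hnd : ∀ k : Nat, ((expand (buildAdj edges))^[k] [v]).Nodup := by
    intro k
    induction k with
    | zero => simp
    | succ k ih => rw [Function.iterate_succ_apply']; exact expand_nodup _ _ ih
  have hlen : ∀ k : Nat, ((expand (buildAdj edges))^[k] [v]).length ≤ (buildAdj edges).keys.length :=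
    fun k => nodup_subset_length_le (hnd k) (hsubK k)
  have key : ∀ k : Nat, expand (buildAdj edges) ((expand (buildAdj edges))^[k] [v])
      = (expand (buildAdj edges))^[k] [v] ∨ k + 1 ≤ ((expand (buildAdj edges))^[k] [v]).length := by
    intro k
    induction k with
    | zero => right; simp
    | succ k ih =>
      rcases ih with h | h
      · left
        rw [Function.iterate_succ_apply', h, h]
      · by_cases hfix : expand (buildAdj edges) ((expand (buildAdj edges))^[k+1] [v])
            = (expand (buildAdj edges))^[k+1] [v]
        · exact Or.inl hfix
        · right
          rcases expand_len (buildAdj edges) ((expand (buildAdj edges))^[k] [v]) with he | he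
          · exfalso
            apply hfix
            rw [Function.iterate_succ_apply', he, he]
          · rw [Function.iterate_succ_apply']
            have : ((expand (buildAdj edges))^[k] [v]).length < (expand (buildAdj edges) ((expand (buildAdj edges))^[k] [v])).length := he
            omega
  rcases key (buildAdj edges).keys.length with h | h
  · exact h
  · exact absurd (hlen (buildAdj edges).keys.length) (by omega)

lemma reach_mem_iterate (edges : List (List Int)) (v u : Int) (hv : v ∈ (buildAdj edges).keys)
    (h : AdjReach (buildAdj edges) v u) :
    u ∈ (expand (buildAdj edges))^[(buildAdj edges).keys.length] [v] := by
  have hvin : ∀ k : Nat, v ∈ (expand (buildAdj edges))^[k] [v] := by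
    intro k
    induction k with
    | zero => simp
    | succ k ih =>
      rw [Function.iterate_succ_apply', mem_expand]
      exact Or.inl ih
  induction h with
  | refl => exact hvin _
  | tail hab hbc ih =>
    rw [← expand_fix edges v hv, mem_expand]
    exact Or.inr ⟨_, ih, hbc⟩

lemma iter_label_le (edges : List (List Int)) :
    ∀ (k : Nat) (u v : Int), u ∈ (expand (buildAdj edges))^[k] [v] →
      (iterLab edges k (bLab0 edges)).getD u u ≤ v := by
  intro k
  induction k with
  | zero =>
    intro u v hu
    simp at hu
    subst hu
    rw [show iterLab edges 0 (bLab0 edges) = bLab0 edges from rfl, lab0_getD]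
  | succ k ih =>
    intro u v hu
    rw [Function.iterate_succ_apply', mem_expand] at hu
    have hstep : iterLab edges (k+1) (bLab0 edges) = roundLab edges (iterLab edges k (bLab0 edges)) := by
      simp only [iterLab, Function.iterate_succ_apply']
    rcases hu with hu | ⟨w, hw, hadj⟩
    · rw [hstep]
      exact le_trans (roundLab_mono edges _ u) (ih u v hu)
    · rw [mem_getD_buildAdj] at hadj
      obtain ⟨u', v', hm, hc⟩ := hadj
      rcases hc with ⟨h1, h2⟩ | ⟨h1, h2⟩
      · rw [← h1, ← h2] at hm
        rw [hstep]
        exact le_trans (roundLab_edge_le edges w u hm _).2 (ih w v hw)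
      · rw [← h1, ← h2] at hm
        rw [hstep]
        exact le_trans (roundLab_edge_le edges u w hm _).1 (ih w v hw)

-- ---- the final labelling ----

def rootF (edges : List (List Int)) (x : Int) : Int := (bLab edges).getD x x

lemma bLab_eq_iter (edges : List (List Int)) :
    bLab edges = iterLab edges (buildAdj edges).keys.length (bLab0 edges) := by
  rw [show bLab edges = bRounds (bLab0 edges).size (bLab0 edges) edges from rfl,
    bRounds_eq_iterLab, lab0_size]

lemma root_sound (edges : List (List Int)) (x : Int) :
    AdjReach (buildAdj edges) x (rootF edges x) ∧
      (x ∉ (buildAdj edges).keys → rootF edges x = x) := by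
  have hinv : ∀ k : Nat, LabInv edges (iterLab edges k (bLab0 edges)) := by
    intro k
    induction k with
    | zero =>
      intro y
      rw [show iterLab edges 0 (bLab0 edges) = bLab0 edges from rfl, lab0_getD]
      exact ⟨Relation.ReflTransGen.refl, fun _ => rfl⟩
    | succ k ih =>
      have : iterLab edges (k+1) (bLab0 edges) = roundLab edges (iterLab edges k (bLab0 edges)) := by
        simp only [iterLab, Function.iterate_succ_apply']
      rw [this]
      exact roundLab_inv edges _ ih
  have := hinv (buildAdj edges).keys.length x
  rw [← bLab_eq_iter] at this
  exact this

lemma root_le (edges : List (List Int)) (v u : Int) (h : AdjReach (buildAdj edges) v u) :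
    rootF edges u ≤ v := by
  by_cases hv : v ∈ (buildAdj edges).keys
  · have hmem := reach_mem_iterate edges v u hv h
    have := iter_label_le edges (buildAdj edges).keys.length u v hmem
    rw [← bLab_eq_iter] at this
    exact this
  · have hu : u = v := (reach_isolated edges hv).1 h
    subst hu
    rw [(root_sound edges u).2 hv]

lemma reach_iff_root (edges : List (List Int)) (x y : Int) :
    AdjReach (buildAdj edges) x y ↔ rootF edges x = rootF edges y := by
  constructor
  · intro h
    apply le_antisymm
    · apply root_le edges (rootF edges y) x
      exact Relation.ReflTransGen.trans (reach_symm edges (root_sound edges y).1)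
        (Relation.ReflTransGen.trans (reach_symm edges h) Relation.ReflTransGen.refl)
    · apply root_le edges (rootF edges x) y
      exact Relation.ReflTransGen.trans (reach_symm edges (root_sound edges x).1) h
  · intro h
    have h1 : AdjReach (buildAdj edges) x (rootF edges x) := (root_sound edges x).1
    have h2 : AdjReach (buildAdj edges) y (rootF edges y) := (root_sound edges y).1
    rw [h] at h1
    exact Relation.ReflTransGen.trans h1 (reach_symm edges h2)

lemma root_mem_keys (edges : List (List Int)) (v : Int) (hv : v ∈ (buildAdj edges).keys) :
    rootF edges v ∈ (buildAdj edges).keys := by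
  rcases reach_mem_keys edges (root_sound edges v).1 with h | h
  · rw [h]; exact hv
  · exact h

-- ---- the members dict and the component lists ----

lemma bMembers_getD_empty (edges : List (List Int)) (r : Int) :
    (bMembers edges).getD r [] =
      (buildAdj edges).keys.filter (fun v => (bLab edges).getD v v == r) := by
  have hfold : bMembers edges =
      ((buildAdj edges).keys.map (fun v => ((bLab edges).getD v v, v))).foldl
        (fun d p => d.modify p.1 [] (fun l => l ++ [p.2])) PySem.Dict.empty := by
    rw [List.foldl_map]
    rfl
  rw [hfold, PySem.Dict.getD_foldl_modify_append, PySem.Dict.getD_empty, List.nil_append,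
    List.filter_map]
  have : ((fun (x : Int × Int) => x.2) ∘ fun v => ((bLab edges).getD v v, v)) = fun v : Int => v := rfl
  rw [List.map_map, this, List.map_id']
  apply List.filter_congr
  intro x _
  rfl

lemma mem_keys_bMembers (edges : List (List Int)) (r : Int) :
    r ∈ (bMembers edges).keys ↔ ∃ v ∈ (buildAdj edges).keys, rootF edges v = r := by
  rw [show bMembers edges = (buildAdj edges).keys.foldl
      (fun d v => d.modify ((bLab edges).getD v v) [] (fun l => l ++ [v])) PySem.Dict.empty from rfl]
  rw [PySem.Dict.keys_foldl_modify_key (buildAdj edges).keys (fun v => (bLab edges).getD v v) []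
    (fun _ v => fun l => l ++ [v]) PySem.Dict.empty]
  rw [PySem.Dict.keys_empty, PySem.Set.update_nil_left, PySem.Set.mem_ofList, List.mem_map]
  constructor
  · rintro ⟨v, hv, hr⟩; exact ⟨v, hv, hr⟩
  · rintro ⟨v, hv, hr⟩; exact ⟨v, hv, hr⟩

lemma comp_spec (edges : List (List Int)) (i : Int) :
    (∀ x, x ∈ (bMembers edges).getD (rootF edges i) [i] ↔ AdjReach (buildAdj edges) i x) ∧
      ((bMembers edges).getD (rootF edges i) [i]).Nodup := by
  by_cases hiK : i ∈ (buildAdj edges).keys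
  · have hrK : rootF edges i ∈ (bMembers edges).keys :=
      (mem_keys_bMembers edges _).2 ⟨i, hiK, rfl⟩
    obtain ⟨l, hl⟩ : ∃ l, (bMembers edges).get? (rootF edges i) = some l := by
      cases h : (bMembers edges).get? (rootF edges i) with
      | none => exact absurd hrK ((PySem.Dict.get?_eq_none_iff_not_mem_keys _ _).1 h)
      | some l => exact ⟨l, rfl⟩
    have hgd : (bMembers edges).getD (rootF edges i) [i] = (bMembers edges).getD (rootF edges i) [] := by
      rw [PySem.Dict.getD_eq_get?_getD, PySem.Dict.getD_eq_get?_getD, hl]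
      rfl
    rw [hgd, bMembers_getD_empty]
    constructor
    · intro x
      rw [List.mem_filter]
      constructor
      · rintro ⟨hxK, hxr⟩
        have : rootF edges x = rootF edges i := by simpa using hxr
        exact reach_symm edges ((reach_iff_root edges x i).2 this)
      · intro h
        refine ⟨?_, by simpa using (reach_iff_root edges x i).1 (reach_symm edges h)⟩
        rcases reach_mem_keys edges h with hx | hx
        · rw [hx]; exact hiK
        · exact hx
    · exact List.Nodup.filter _ (nodup_keys_buildAdj edges)
  · have hr : rootF edges i = i := (root_sound edges i).2 hiK
    have hnK : rootF edges i ∉ (bMembers edges).keys := by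
      rw [mem_keys_bMembers]
      rintro ⟨v, hvK, hveq⟩
      apply hiK
      have := root_mem_keys edges v hvK
      rw [hveq, hr] at this
      exact this
    have hgd : (bMembers edges).getD (rootF edges i) [i] = [i] := by
      rw [PySem.Dict.getD_eq_get?_getD,
        (PySem.Dict.get?_eq_none_iff_not_mem_keys _ _).2 hnK]
      rfl
    rw [hgd]
    constructor
    · intro x
      simp only [List.mem_singleton]
      rw [reach_isolated edges hiK]
    · simp

-- ---- small glue lemmas ----

lemma foldl_discard_mem (P : Int → Prop) [DecidablePred P] :
    ∀ (l : List Int) (s : PySem.Set Int) (x : Int),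
      x ∈ l.foldl (fun s v => if P v then PySem.Set.discard s v else s) s ↔
        x ∈ s ∧ ¬(P x ∧ x ∈ l) := by
  intro l
  induction l with
  | nil => intro s x; simp
  | cons y t ih =>
    intro s x
    simp only [List.foldl_cons]
    by_cases hy : P y
    · rw [if_pos hy, ih]
      simp only [PySem.Set.mem_discard, List.mem_cons]
      constructor
      · rintro ⟨⟨hs, hne⟩, hnp⟩
        exact ⟨hs, fun ⟨hp, hm⟩ => by
          rcases hm with rfl | hm
          · exact hne rfl
          · exact hnp ⟨hp, hm⟩⟩
      · rintro ⟨hs, hnp⟩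
        by_cases hxy : x = y
        · exact absurd ⟨hxy ▸ hy, Or.inl hxy⟩ hnp
        · exact ⟨⟨hs, hxy⟩, fun ⟨hp, hm⟩ => hnp ⟨hp, Or.inr hm⟩⟩
    · rw [if_neg hy, ih]
      simp only [List.mem_cons]
      constructor
      · rintro ⟨hs, hnp⟩
        exact ⟨hs, fun ⟨hp, hm⟩ => by
          rcases hm with rfl | hm
          · exact hy hp
          · exact hnp ⟨hp, hm⟩⟩
      · rintro ⟨hs, hnp⟩
        exact ⟨hs, fun ⟨hp, hm⟩ => hnp ⟨hp, Or.inr hm⟩⟩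

lemma contains_congr (t t' : PySem.Set Int) (h : ∀ x, x ∈ t ↔ x ∈ t') (x : Int) :
    t.contains x = t'.contains x := by
  apply Bool.coe_iff_coe.mp
  rw [PySem.Set.contains_iff, PySem.Set.contains_iff]
  exact h x

lemma inter_congr (s t t' : PySem.Set Int) (h : ∀ x, x ∈ t ↔ x ∈ t') :
    PySem.Set.inter s t = PySem.Set.inter s t' := by
  show s.filter (fun x => t.contains x) = s.filter (fun x => t'.contains x)
  apply List.filter_congr
  intro x _
  exact contains_congr t t' h x

lemma all_congr_mem_equal (l l' : List Int) (p : Int → Bool) (h : ∀ x, x ∈ l ↔ x ∈ l') :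
    l.all p = l'.all p := by
  apply Bool.coe_iff_coe.mp
  rw [List.all_eq_true, List.all_eq_true]
  constructor
  · intro ha x hx; exact ha x ((h x).2 hx)
  · intro ha x hx; exact ha x ((h x).1 hx)

lemma foldl_rel {α σ τ : Type} (l : List α) (R : σ → τ → Prop) (f : σ → α → σ) (g : τ → α → τ)
    (s : σ) (t : τ) (h0 : R s t) (hstep : ∀ s t a, R s t → R (f s a) (g t a)) :
    R (l.foldl f s) (l.foldl g t) := by
  induction l generalizing s t with
  | nil => exact h0
  | cons a l ih => exact ih _ _ (hstep s t a h0)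


-- ---- final assembly: the two outer loops, step by step ----

-- A's loop body (identical to the lambda inside `solution`, with the lets for G resolved)
def stepA (edges : List (List Int)) (st : Std.HashSet Int × Int × Int) (i : Int) :
    Std.HashSet Int × Int × Int :=
  if i ∈ st.1 then st
  else
    let saw := dfsLoop (buildAdj edges) (i :: (buildAdj edges).keys)
      (fun k x hx => List.mem_cons_of_mem _ (buildAdj_getD_mem_keys edges k x hx))
      [i] [i]
      (fun x hx => by
        simp only [List.mem_singleton] at hx
        exact hx ▸ List.mem_cons_self)
      (List.nodup_singleton i)
    let seen := saw.foldl (fun h x => h.insert x) st.1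
    if (saw.map (fun v => (((buildAdj edges).getD v []).length : Int))).sum + 2 = (saw.length : Int) * 2 then
      let saw2 := saw.foldl (fun s v => if ((buildAdj edges).getD v []).length = 1 then PySem.Set.discard s v else s) saw
      (seen, st.2.1 + 1,
        st.2.2 + (if saw2.all (fun v => decide ((PySem.Set.inter ((buildAdj edges).getD v []) saw2).length ≤ 2)) then 1 else 0))
    else
      (seen, st.2.1, st.2.2)

-- B's loop body (identical to the lambda inside `solution_alt`)
def stepB (edges : List (List Int)) (st : Std.HashSet Int × Int × Int) (i : Int) :
    Std.HashSet Int × Int × Int :=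
  let r := (bLab edges).getD i i
  if r ∈ st.1 then st
  else
    let done := st.1.insert r
    let comp := (bMembers edges).getD r [i]
    let degsum := (comp.map (fun v => (((buildAdj edges).getD v []).length : Int))).sum
    if degsum = 2 * ((comp.length : Int) - 1) then
      let spine := comp.filter (fun v => ((buildAdj edges).getD v []).length ≠ 1)
      let sp := PySem.Set.ofList spine
      (done, st.2.1 + 1,
        st.2.2 + (if spine.all (fun v => decide ((PySem.Set.inter ((buildAdj edges).getD v []) sp).length ≤ 2)) then 1 else 0))
    else
      (done, st.2.1, st.2.2)

lemma solutionA_eq (n : Int) (edges : List (List Int)) :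
    solution n edges = ((((PySem.List.pyRange 0 n 1).foldl (stepA edges) ((∅ : Std.HashSet Int), 0, 0)).2.1),
      (((PySem.List.pyRange 0 n 1).foldl (stepA edges) ((∅ : Std.HashSet Int), 0, 0)).2.2)) := rfl

lemma solutionB_eq (n : Int) (edges : List (List Int)) :
    solution_alt n edges = ((((PySem.List.pyRange 0 n 1).foldl (stepB edges) ((∅ : Std.HashSet Int), 0, 0)).2.1),
      (((PySem.List.pyRange 0 n 1).foldl (stepB edges) ((∅ : Std.HashSet Int), 0, 0)).2.2)) := rfl

lemma mem_foldl_insertHS (l : List Int) (h0 : Std.HashSet Int) (x : Int) :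
    x ∈ l.foldl (fun h y => h.insert y) h0 ↔ x ∈ h0 ∨ x ∈ l := by
  induction l generalizing h0 with
  | nil => simp
  | cons y t ih =>
    simp only [List.foldl_cons, ih, Std.HashSet.mem_insert, List.mem_cons, beq_iff_eq]
    constructor
    · rintro ((rfl | h) | h)
      · exact Or.inr (Or.inl rfl)
      · exact Or.inl h
      · exact Or.inr (Or.inr h)
    · rintro (h | (rfl | h))
      · exact Or.inl (Or.inr h)
      · exact Or.inl (Or.inl rfl)
      · exact Or.inr h

lemma step_equiv (edges : List (List Int)) (s t : Std.HashSet Int × Int × Int) (i : Int)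
    (hR : s.2 = t.2 ∧ ∀ x, x ∈ s.1 ↔ rootF edges x ∈ t.1) :
    (stepA edges s i).2 = (stepB edges t i).2 ∧
      ∀ x, x ∈ (stepA edges s i).1 ↔ rootF edges x ∈ (stepB edges t i).1 := by
  obtain ⟨h2, hmem⟩ := hR
  by_cases hskip : i ∈ s.1
  · have hskip' : (bLab edges).getD i i ∈ t.1 := (hmem i).1 hskip
    simp only [stepA, stepB, if_pos hskip, if_pos hskip']
    exact ⟨h2, hmem⟩
  · have hskip' : (bLab edges).getD i i ∉ t.1 := fun hc => hskip ((hmem i).2 hc)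
    simp only [stepA, stepB, if_neg hskip, if_neg hskip']
    have hsawspec := dfsLoop_spec edges i
      (fun k x hx => List.mem_cons_of_mem _ (buildAdj_getD_mem_keys edges k x hx))
      (fun x hx => by
        simp only [List.mem_singleton] at hx
        exact hx ▸ List.mem_cons_self)
      (List.nodup_singleton i)
    have hsawnd := dfsLoop_nodup (buildAdj edges) (i :: (buildAdj edges).keys)
      (fun k x hx => List.mem_cons_of_mem _ (buildAdj_getD_mem_keys edges k x hx))
      [i] [i]
      (fun x hx => by
        simp only [List.mem_singleton] at hx
        exact hx ▸ List.mem_cons_self)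
      (List.nodup_singleton i)
    obtain ⟨hcomp, hcompnd⟩ := comp_spec edges i
    set saw := dfsLoop (buildAdj edges) (i :: (buildAdj edges).keys)
      (fun k x hx => List.mem_cons_of_mem _ (buildAdj_getD_mem_keys edges k x hx))
      [i] [i]
      (fun x hx => by
        simp only [List.mem_singleton] at hx
        exact hx ▸ List.mem_cons_self)
      (List.nodup_singleton i) with hsawdef
    set comp := (bMembers edges).getD ((bLab edges).getD i i) [i] with hcompdef
    have hperm : saw.Perm comp :=
      (List.perm_ext_iff_of_nodup hsawnd hcompnd).2 (fun x => (hsawspec x).trans (hcomp x).symm)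
    have hsum : (saw.map (fun v => (((buildAdj edges).getD v []).length : Int))).sum
        = (comp.map (fun v => (((buildAdj edges).getD v []).length : Int))).sum :=
      (hperm.map _).sum_eq
    have hlen : saw.length = comp.length := hperm.length_eq
    have hcond : ((saw.map (fun v => (((buildAdj edges).getD v []).length : Int))).sum + 2 = (saw.length : Int) * 2)
        ↔ ((comp.map (fun v => (((buildAdj edges).getD v []).length : Int))).sum = 2 * ((comp.length : Int) - 1)) := by
      rw [hsum, hlen]
      constructor <;> intro h <;> omega
    have hmemnew : ∀ x, (x ∈ saw.foldl (fun h y => h.insert y) s.1 ↔ rootF edges x ∈ t.1.insert ((bLab edges).getD i i)) := by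
      intro x
      rw [mem_foldl_insertHS, Std.HashSet.mem_insert, beq_iff_eq]
      have h1 : x ∈ saw ↔ rootF edges i = rootF edges x :=
        (hsawspec x).trans (reach_iff_root edges i x)
      have h2' := hmem x
      have h3 : rootF edges i = (bLab edges).getD i i := rfl
      rw [← h3]
      tauto
    have hind : (saw.foldl (fun s v => if ((buildAdj edges).getD v []).length = 1 then PySem.Set.discard s v else s) saw).all
          (fun v => decide ((PySem.Set.inter ((buildAdj edges).getD v []) (saw.foldl (fun s v => if ((buildAdj edges).getD v []).length = 1 then PySem.Set.discard s v else s) saw)).length ≤ 2))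
        = (comp.filter (fun v => ((buildAdj edges).getD v []).length ≠ 1)).all
          (fun v => decide ((PySem.Set.inter ((buildAdj edges).getD v []) (PySem.Set.ofList (comp.filter (fun v => ((buildAdj edges).getD v []).length ≠ 1)))).length ≤ 2)) := by
      set saw2 := saw.foldl (fun s v => if ((buildAdj edges).getD v []).length = 1 then PySem.Set.discard s v else s) saw with hsaw2def
      set spine := comp.filter (fun v => ((buildAdj edges).getD v []).length ≠ 1) with hspinedef
      have hsaw2mem : ∀ x, x ∈ saw2 ↔ (AdjReach (buildAdj edges) i x ∧ ((buildAdj edges).getD x []).length ≠ 1) := by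
        intro x
        rw [hsaw2def, foldl_discard_mem (fun v => ((buildAdj edges).getD v []).length = 1) saw saw x,
          hsawspec x]
        constructor
        · rintro ⟨hr, hn⟩
          exact ⟨hr, fun h1 => hn ⟨h1, hr⟩⟩
        · rintro ⟨hr, hn⟩
          exact ⟨hr, fun h1 => hn h1.1⟩
      have hspinemem : ∀ x, x ∈ spine ↔ (AdjReach (buildAdj edges) i x ∧ ((buildAdj edges).getD x []).length ≠ 1) := by
        intro x
        rw [hspinedef, List.mem_filter]
        constructor
        · rintro ⟨hc, hd⟩
          exact ⟨(hcomp x).1 hc, by simpa using hd⟩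
        · rintro ⟨hr, hn⟩
          exact ⟨(hcomp x).2 hr, by simpa using hn⟩
      have hmemeq : ∀ x, x ∈ saw2 ↔ x ∈ spine := fun x => (hsaw2mem x).trans (hspinemem x).symm
      have hsp : ∀ x, x ∈ saw2 ↔ x ∈ PySem.Set.ofList spine := by
        intro x
        rw [PySem.Set.mem_ofList]
        exact hmemeq x
      have hpred : (fun v => decide ((PySem.Set.inter ((buildAdj edges).getD v []) saw2).length ≤ 2))
          = (fun v => decide ((PySem.Set.inter ((buildAdj edges).getD v []) (PySem.Set.ofList spine)).length ≤ 2)) := by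
        funext v
        rw [inter_congr ((buildAdj edges).getD v []) saw2 (PySem.Set.ofList spine) hsp]
      rw [hpred]
      exact all_congr_mem_equal saw2 spine _ hmemeq
    constructor
    · rw [apply_ite Prod.snd, apply_ite Prod.snd, if_congr hcond rfl rfl]
      by_cases hB : (comp.map (fun v => (((buildAdj edges).getD v []).length : Int))).sum = 2 * ((comp.length : Int) - 1)
      · rw [if_pos hB, if_pos hB]
        show (s.2.1 + 1, s.2.2 + _) = (t.2.1 + 1, t.2.2 + _)
        rw [h2, hind]
      · rw [if_neg hB, if_neg hB]
        exact h2
    · have hA1 : (if (saw.map (fun v => (((buildAdj edges).getD v []).length : Int))).sum + 2 = (saw.length : Int) * 2 then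
            (saw.foldl (fun h y => h.insert y) s.1, s.2.1 + 1,
              s.2.2 + (if (saw.foldl (fun s v => if ((buildAdj edges).getD v []).length = 1 then PySem.Set.discard s v else s) saw).all
                (fun v => decide ((PySem.Set.inter ((buildAdj edges).getD v []) (saw.foldl (fun s v => if ((buildAdj edges).getD v []).length = 1 then PySem.Set.discard s v else s) saw)).length ≤ 2)) then (1:Int) else 0))
          else (saw.foldl (fun h y => h.insert y) s.1, s.2.1, s.2.2)).1 = saw.foldl (fun h y => h.insert y) s.1 := by
        split_ifs <;> rfl
      have hB1 : (if (comp.map (fun v => (((buildAdj edges).getD v []).length : Int))).sum = 2 * ((comp.length : Int) - 1) then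
            (t.1.insert ((bLab edges).getD i i), t.2.1 + 1,
              t.2.2 + (if (comp.filter (fun v => ((buildAdj edges).getD v []).length ≠ 1)).all
                (fun v => decide ((PySem.Set.inter ((buildAdj edges).getD v []) (PySem.Set.ofList (comp.filter (fun v => ((buildAdj edges).getD v []).length ≠ 1)))).length ≤ 2)) then (1:Int) else 0))
          else (t.1.insert ((bLab edges).getD i i), t.2.1, t.2.2)).1 = t.1.insert ((bLab edges).getD i i) := by
        split_ifs <;> rfl
      rw [hA1, hB1]
      exact hmemnew

-- ===== VERDICT (by name: the statement is the Claim_ definition above) =====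
theorem solution_spec : Claim_equal_solution := by
  unfold Claim_equal_solution
  intro n edges hdom hpre
  unfold Spec_solution
  rw [solutionA_eq, solutionB_eq]
  have hrel := foldl_rel (PySem.List.pyRange 0 n 1)
    (fun (s t : Std.HashSet Int × Int × Int) => s.2 = t.2 ∧ ∀ x, x ∈ s.1 ↔ rootF edges x ∈ t.1)
    (stepA edges) (stepB edges) ((∅ : Std.HashSet Int), 0, 0) ((∅ : Std.HashSet Int), 0, 0)
    ⟨rfl, fun x => by simp⟩
    (fun s t a h => step_equiv edges s t a h)
  rw [hrel.1]
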